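-- pv_equiv track=rewrite | github.com/Kirillova-Anastasia/ya-algorithm-training | 02_LinearSearch/Lecture.py | MinimalOdd
-- ===== SOURCE A (Python) =====
-- def MinimalOdd(seq):
--     ans = -1
--     for i in range(len(seq)):
--         if seq[i] % 2:
--             continue
--         if ans == -1 or seq[i] < ans:
--             ans = seq[i]
--     return ans
-- ===== SOURCE B (Python) =====
-- def MinimalOdd(seq):
--     evens = [x for x in seq if x % 2 == 0]
--     return min(evens) if evens else -1
-- ===== Notes on version B (the rewrite author's own statement) =====
-- stated objective: simpler
-- what changed: Replaces A's fused index loop with sentinel min-tracking by a filter phase (collect even elements) followed by a reduce phase (min of the filtered list, -1 if empty).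
import Mathlib
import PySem

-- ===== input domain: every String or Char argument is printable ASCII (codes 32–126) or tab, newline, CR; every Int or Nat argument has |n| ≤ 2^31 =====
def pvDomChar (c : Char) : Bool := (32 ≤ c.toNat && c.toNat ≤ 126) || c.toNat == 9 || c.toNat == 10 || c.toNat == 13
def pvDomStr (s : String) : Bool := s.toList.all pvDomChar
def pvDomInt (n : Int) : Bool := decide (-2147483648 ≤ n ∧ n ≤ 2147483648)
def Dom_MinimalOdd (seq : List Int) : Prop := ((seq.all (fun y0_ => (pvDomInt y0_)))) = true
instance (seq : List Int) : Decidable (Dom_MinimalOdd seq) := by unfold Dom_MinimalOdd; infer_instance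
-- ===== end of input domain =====

-- B replaces A's fused sentinel-tracking index loop by filter-then-min (simpler decomposition).

-- ===== PORT A =====
def MinimalOdd (seq : List Int) : Int :=
  (PySem.List.pyRange 0 (seq.length : Int) 1).foldl
    (fun ans i =>
      if PySem.Int.mod (PySem.List.pyGetD seq i 0) 2 ≠ 0 then ans
      else if ans = -1 ∨ PySem.List.pyGetD seq i 0 < ans then PySem.List.pyGetD seq i 0 else ans)
    (-1)

-- ===== PORT B =====
def MinimalOdd_alt (seq : List Int) : Int :=
  let evens := seq.filter (fun x => PySem.Int.mod x 2 == 0)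
  match PySem.List.min? evens (fun x => x) with
  | some m => m
  | none => -1

-- ===== PRECONDITION & SPEC =====
def Spec_MinimalOdd (seq : List Int) (out : Int) : Prop := out = MinimalOdd_alt seq
instance (seq : List Int) (out : Int) : Decidable (Spec_MinimalOdd seq out) := by unfold Spec_MinimalOdd; infer_instance

-- ===== CLAIM (what is proved, stated in full; the proofs are below) =====
def Claim_equal_MinimalOdd : Prop := ∀ (seq : List Int), Dom_MinimalOdd seq → Spec_MinimalOdd seq (MinimalOdd seq)

-- ===== LEMMAS AND PROOFS =====

def pvStep (ans x : Int) : Int :=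
  if PySem.Int.mod x 2 ≠ 0 then ans
  else if ans = -1 ∨ x < ans then x else ans

theorem pv_even_ne_neg_one (x : Int) (h : PySem.Int.mod x 2 = 0) : x ≠ -1 := by
  intro hx; subst hx; simp [PySem.Int.mod] at h

-- once the accumulator is a real (even) value, A's loop is a running min over the even elements
theorem pv_aux (l : List Int) : ∀ a : Int, a ≠ -1 →
    l.foldl pvStep a = (l.filter (fun x => PySem.Int.mod x 2 == 0)).foldl min a := by
  induction l with
  | nil => intro a _; simp
  | cons x l ih =>
    intro a ha
    by_cases hx : PySem.Int.mod x 2 = 0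
    · have hx' : x ≠ -1 := pv_even_ne_neg_one x hx
      have hstep : pvStep a x = min a x := by
        simp only [pvStep, hx, ne_eq, not_true_eq_false, if_false, ha, false_or]
        rcases lt_or_ge x a with h | h
        · rw [if_pos h, min_eq_right h.le]
        · rw [if_neg (not_lt.mpr h), min_eq_left h]
      have hmin : min a x ≠ -1 := by
        rcases min_choice a x with h | h <;> rw [h] <;> assumption
      simp only [List.foldl_cons, List.filter_cons, hx, beq_self_eq_true, if_pos]
      rw [hstep, ih (min a x) hmin]
    · simp only [List.foldl_cons, List.filter_cons]
      have : (PySem.Int.mod x 2 == 0) = false := by simpa using hx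
      simp only [this, Bool.false_eq_true, if_false]
      have : pvStep a x = a := by unfold pvStep; rw [if_pos hx]
      rw [this, ih a ha]

theorem pv_main (l : List Int) :
    l.foldl pvStep (-1) =
      (match PySem.List.min? (l.filter (fun x => PySem.Int.mod x 2 == 0)) (fun x => x) with
       | some m => m
       | none => (-1 : Int)) := by
  induction l with
  | nil => simp [PySem.List.min?]
  | cons x l ih =>
    by_cases hx : PySem.Int.mod x 2 = 0
    · have hx' : x ≠ -1 := pv_even_ne_neg_one x hx
      have hstep : pvStep (-1) x = x := by
        simp only [pvStep, hx, ne_eq, not_true_eq_false, if_false]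
        simp
      simp only [List.foldl_cons, List.filter_cons, hx, beq_self_eq_true, if_pos, hstep]
      rw [pv_aux l x hx', PySem.List.min?_id_cons]
    · have hb : (PySem.Int.mod x 2 == 0) = false := by simpa using hx
      have hstep : pvStep (-1) x = -1 := by unfold pvStep; rw [if_pos hx]
      simp only [List.foldl_cons, List.filter_cons, hb, Bool.false_eq_true, if_false, hstep]
      exact ih

-- ===== VERDICT (by name: the statement is the Claim_ definition above) =====
theorem MinimalOdd_spec : Claim_equal_MinimalOdd := by
  intro seq _
  show MinimalOdd seq = MinimalOdd_alt seq
  unfold MinimalOdd MinimalOdd_alt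
  rw [show (fun (ans i : Int) =>
      if PySem.Int.mod (PySem.List.pyGetD seq i 0) 2 ≠ 0 then ans
      else if ans = -1 ∨ PySem.List.pyGetD seq i 0 < ans then PySem.List.pyGetD seq i 0 else ans)
      = (fun ans i => pvStep ans (PySem.List.pyGetD seq i 0)) from rfl,
    PySem.List.foldl_pyRange_zero_pyGetD' seq 0 pvStep (-1)]
  exact pv_main seq
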